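-- pv_equiv track=rewrite | github.com/RetroElkinTG/Hypopnea-Diagnosis | solutions/find_episodes.py | find_episodes
-- ===== SOURCE A (Python) =====
-- def find_episodes(disorder_status,min_segment):
--     count = 0
--     current_episode_length = 0
--     episode_array = []
--
--     # Iterate through the array, finding episodes
--     for index, item in enumerate(disorder_status):
--         if item:
--             if current_episode_length == 0:
--                 # Start a new sequence
--                 start_index = index
--             current_episode_length += 1
--         else:
--             if current_episode_length >= min_segment:
--                 count += 1
--                 episode_array.append([start_index, current_episode_length])
--             current_episode_length = 0
--
--     # Check the last sequence
--     if current_episode_length >= min_segment: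
--         count += 1
--         episode_array.append([start_index, current_episode_length])
--
--     return episode_array
-- ===== SOURCE B (Python) =====
-- def find_episodes(disorder_status, min_segment):
--     flags = [bool(x) for x in disorder_status]
--     n = len(flags)
--     starts = [i for i in range(n) if flags[i] and (i == 0 or not flags[i - 1])]
--     ends = [i + 1 for i in range(n) if flags[i] and (i == n - 1 or not flags[i + 1])]
--     return [[s, e - s] for s, e in zip(starts, ends) if e - s >= min_segment]
-- ===== Notes on version B (the rewrite author's own statement) =====
-- stated objective: alternative
-- what changed: Instead of A's single-pass state machine (running length counter + trailing flush), B computes the list of run start indices and the list of run end indices independently by neighbour comparisons (flags[i] truthy and previous/next falsy) in staged passes, zips them into (start,end) pairs and filters by length.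
-- intended difference: When min_segment <= 0 and the list starts with True but contains two adjacent Falses or ends with False, A returns extra zero-length episodes [stale_start, 0] left over from its counter state (e.g. A([True,False,False],0)=[[0,1],[0,0],[0,0]]); B returns only the actual maximal True runs ([[0,1]]), which is the intended value. — e.g. on find_episodes([true, false, false], 0): A returns [[0, 1], [0, 0], [0, 0]], B returns [[0, 1]]
import Mathlib
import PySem

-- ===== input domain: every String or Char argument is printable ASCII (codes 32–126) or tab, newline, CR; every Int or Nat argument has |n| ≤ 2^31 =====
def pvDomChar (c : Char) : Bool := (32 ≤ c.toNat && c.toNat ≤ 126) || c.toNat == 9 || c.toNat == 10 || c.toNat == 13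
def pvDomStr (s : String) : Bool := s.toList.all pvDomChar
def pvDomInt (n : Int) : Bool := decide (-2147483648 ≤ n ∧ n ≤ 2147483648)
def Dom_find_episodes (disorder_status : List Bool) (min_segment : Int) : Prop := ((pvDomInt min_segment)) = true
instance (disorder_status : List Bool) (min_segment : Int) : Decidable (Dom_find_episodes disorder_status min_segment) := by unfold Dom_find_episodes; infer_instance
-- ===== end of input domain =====

-- B replaces A's single-pass state machine by staged passes: run starts and run ends are
-- computed independently by neighbour comparisons, zipped and filtered by length
-- (objective: alternative algorithm, same O(n) cost).

-- ===== PORT A =====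
-- loop body of A: state = (count, current_episode_length, start_index, episode_array);
-- Python's start_index is unassigned before the first True — modelled by the initial 0,
-- which is only ever read on inputs excluded by Pre_find_episodes (where Python raises NameError).
def aStep (min_segment : Int) (st : Int × Int × Int × List (List Int)) (p : Int × Bool) :
    Int × Int × Int × List (List Int) :=
  match st, p with
  | (count, cur, start, arr), (index, item) =>
    if item then
      (count, cur + 1, (if cur = 0 then index else start), arr)
    else
      if cur ≥ min_segment then (count + 1, 0, start, arr ++ [[start, cur]])
      else (count, 0, start, arr)

def find_episodes (disorder_status : List Bool) (min_segment : Int) : List (List Int) :=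
  match (PySem.List.enumerate disorder_status 0).foldl (aStep min_segment)
      (0, 0, 0, ([] : List (List Int))) with
  | (_, cur, start, arr) =>
    if cur ≥ min_segment then arr ++ [[start, cur]] else arr

-- ===== PORT B =====
-- Source B: starts = run start indices, ends = run end positions (neighbour comparisons over
-- range(n)); result = [[s, e-s] for s,e in zip(starts, ends) if e-s >= min_segment].
def find_episodes_alt (disorder_status : List Bool) (min_segment : Int) : List (List Int) :=
  let flags := disorder_status
  let n := flags.length
  let starts := (List.range n).filter
    (fun i => flags.getD i false && (i == 0 || !(flags.getD (i - 1) false)))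
  let ends := ((List.range n).filter
    (fun i => flags.getD i false && (i == n - 1 || !(flags.getD (i + 1) false)))).map (· + 1)
  (starts.zip ends).filterMap (fun p : Nat × Nat =>
    if (p.2 : Int) - (p.1 : Int) ≥ min_segment then
      some [(p.1 : Int), (p.2 : Int) - (p.1 : Int)]
    else none)

-- ===== PRECONDITION & SPEC =====
-- Pre_ excludes exactly the inputs where A raises NameError (start_index never assigned
-- before its first use): min_segment ≤ 0 with an empty list or a list starting with False.
def Pre_find_episodes (disorder_status : List Bool) (min_segment : Int) : Prop :=
  1 ≤ min_segment ∨ disorder_status.head? = some true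

instance (disorder_status : List Bool) (min_segment : Int) : Decidable (Pre_find_episodes disorder_status min_segment) := by unfold Pre_find_episodes; infer_instance

def pvWitness_find_episodes : List Bool × Int := ([true, true, false, true], 2)

-- helper for D_: the list contains two adjacent Falses
def badFF : List Bool → Bool
  | [] => false
  | [_] => false
  | a :: b :: t => (!a && !b) || badFF (b :: t)

-- When min_segment ≤ 0 and the list starts with True but has two adjacent Falses or ends
-- with False, A returns extra zero-length episodes [stale_start, 0] left over from its
-- counter state; B returns only the actual maximal True runs, which is the intended value.
def D_find_episodes (disorder_status : List Bool) (min_segment : Int) : Prop :=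
  min_segment ≤ 0 ∧ disorder_status.head? = some true ∧
    (badFF disorder_status = true ∨ disorder_status.getLast? = some false)

instance (disorder_status : List Bool) (min_segment : Int) : Decidable (D_find_episodes disorder_status min_segment) := by unfold D_find_episodes; infer_instance

def Spec_find_episodes (disorder_status : List Bool) (min_segment : Int) (out : List (List Int)) : Prop := ¬ D_find_episodes disorder_status min_segment → out = find_episodes_alt disorder_status min_segment
instance (disorder_status : List Bool) (min_segment : Int) (out : List (List Int)) : Decidable (Spec_find_episodes disorder_status min_segment out) := by unfold Spec_find_episodes; infer_instance

def pvDiffWitness_find_episodes : List Bool × Int := ([true, false, false], 0)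
def pvDiffWitnessOut_find_episodes : (List (List Int)) × (List (List Int)) :=
  ([[0, 1], [0, 0], [0, 0]], [[0, 1]])

-- ===== CLAIM (what is proved, stated in full; the proofs are below) =====
def Claim_unchanged_find_episodes : Prop := ∀ (disorder_status : List Bool) (min_segment : Int), Dom_find_episodes disorder_status min_segment → Pre_find_episodes disorder_status min_segment → Spec_find_episodes disorder_status min_segment (find_episodes disorder_status min_segment)
def Claim_changed_find_episodes : Prop := Dom_find_episodes (pvDiffWitness_find_episodes.1) (pvDiffWitness_find_episodes.2) ∧ Pre_find_episodes (pvDiffWitness_find_episodes.1) (pvDiffWitness_find_episodes.2) ∧ D_find_episodes (pvDiffWitness_find_episodes.1) (pvDiffWitness_find_episodes.2) ∧ find_episodes (pvDiffWitness_find_episodes.1) (pvDiffWitness_find_episodes.2) = pvDiffWitnessOut_find_episodes.1 ∧ find_episodes_alt (pvDiffWitness_find_episodes.1) (pvDiffWitness_find_episodes.2) = pvDiffWitnessOut_find_episodes.2 ∧ pvDiffWitnessOut_find_episodes.1 ≠ pvDiffWitnessOut_find_episodes.2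

-- ===== LEMMAS AND PROOFS =====

-- ---- A-side machinery: A's fold characterised through the run recursion altRun ----

-- the trailing flush of A, as a function of the final loop state
def aFinish (min_segment : Int) (st : Int × Int × Int × List (List Int)) : List (List Int) :=
  match st with
  | (_, cur, start, arr) => if cur ≥ min_segment then arr ++ [[start, cur]] else arr

-- proof-side run recursion: emits [pos, n] for each maximal true run of length n ≥ m
def altRun (disorder_status : List Bool) (min_segment : Int) (pos : Int) : List (List Int) :=
  match disorder_status with
  | [] => []
  | b :: t =>
    let n : Int := 1 + (t.takeWhile (· == b)).length
    let rest := t.dropWhile (· == b)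
    (if b && decide (n ≥ min_segment) then [[pos, n]] else []) ++ altRun rest min_segment (pos + n)
termination_by disorder_status.length
decreasing_by
  simp only [List.length_cons]
  exact Nat.lt_succ_of_le (List.length_dropWhile_le _ t)

theorem aStep_true (m c cur s : Int) (arr : List (List Int)) (i : Int) :
    aStep m (c, cur, s, arr) (i, true) = (c, cur + 1, (if cur = 0 then i else s), arr) := by
  simp [aStep]

theorem aStep_false (m c cur s : Int) (arr : List (List Int)) (i : Int) :
    aStep m (c, cur, s, arr) (i, false) =
      (if cur ≥ m then (c + 1, 0, s, arr ++ [[s, cur]]) else (c, 0, s, arr)) := by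
  simp [aStep]

theorem find_episodes_eq (ds : List Bool) (m : Int) :
    find_episodes ds m =
      aFinish m ((PySem.List.enumerate ds 0).foldl (aStep m) (0, 0, 0, [])) := by
  unfold find_episodes aFinish
  rcases h : (PySem.List.enumerate ds 0).foldl (aStep m) (0, 0, 0, ([] : List (List Int))) with
    ⟨c, cur, start, arr⟩
  simp

-- folding A's loop over an all-true run keeps (count, start, arr) and adds the length
theorem fold_true_run (m : Int) (run : List Bool) (hrun : ∀ b ∈ run, b = true) :
    ∀ (c cur s : Int) (arr : List (List Int)) (i : Int), 1 ≤ cur →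
      (PySem.List.enumerate run i).foldl (aStep m) (c, cur, s, arr) =
        (c, cur + run.length, s, arr) := by
  induction run with
  | nil => intro c cur s arr i _; simp [PySem.List.enumerate_nil]
  | cons b t ih =>
    intro c cur s arr i hcur
    have hb : b = true := hrun b (List.mem_cons_self ..)
    subst hb
    have ht : ∀ b ∈ t, b = true := fun b hb => hrun b (List.mem_cons_of_mem _ hb)
    rw [PySem.List.enumerate_cons, List.foldl_cons]
    have hne : ¬ cur = 0 := by omega
    rw [aStep_true, if_neg hne]
    rw [ih ht c (cur + 1) s arr (i + 1) (by omega)]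
    simp only [List.length_cons]
    push_cast
    ring_nf

-- starting from a closed episode, a nonempty all-true run sets start := i
theorem fold_true_run_start (m : Int) (t : List Bool) (ht : ∀ b ∈ t, b = true)
    (c s : Int) (arr : List (List Int)) (i : Int) :
    (PySem.List.enumerate (true :: t) i).foldl (aStep m) (c, 0, s, arr) =
      (c, 1 + (t.length : Int), i, arr) := by
  rw [PySem.List.enumerate_cons, List.foldl_cons]
  rw [aStep_true, if_pos rfl]
  simp only [zero_add]
  rw [fold_true_run m t ht c 1 i arr (i + 1) (by omega)]

theorem altRun_false_cons (t : List Bool) (m pos : Int) :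
    altRun (false :: t) m pos = altRun t m (pos + 1) := by
  cases t with
  | nil => simp [altRun]
  | cons c t' =>
    cases c with
    | false =>
      rw [altRun, altRun]
      simp only [List.takeWhile_cons, List.dropWhile_cons]
      norm_num
      ring_nf
    | true =>
      rw [altRun]
      simp only [List.takeWhile_cons, List.dropWhile_cons]
      norm_num

theorem badFF_cons (a : Bool) (l : List Bool) (h : badFF (a :: l) = false) :
    badFF l = false := by
  cases l with
  | nil => rfl
  | cons b t => rw [badFF] at h; exact (Bool.or_eq_false_iff.mp h).2

theorem badFF_append (xs ys : List Bool) (h : badFF (xs ++ ys) = false) :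
    badFF ys = false := by
  induction xs with
  | nil => exact h
  | cons a xs' ih => exact ih (badFF_cons a _ h)

theorem altRun_nil (m pos : Int) : altRun [] m pos = [] := by
  rw [altRun]

theorem altRun_true_cons (t : List Bool) (m pos : Int) :
    altRun (true :: t) m pos =
      (if (1 + ((t.takeWhile (· == true)).length : Int)) ≥ m then
          [[pos, 1 + ((t.takeWhile (· == true)).length : Int)]] else []) ++
        altRun (t.dropWhile (· == true)) m (pos + (1 + ((t.takeWhile (· == true)).length : Int))) := by
  rw [altRun]
  simp

-- A = altRun, regime min_segment ≥ 1
theorem main_pos (m : Int) (hm : 1 ≤ m) :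
    ∀ (fuel : Nat) (ds : List Bool), ds.length ≤ fuel →
      ∀ (c s pos : Int) (arr : List (List Int)),
        aFinish m ((PySem.List.enumerate ds pos).foldl (aStep m) (c, 0, s, arr)) =
          arr ++ altRun ds m pos := by
  intro fuel
  induction fuel with
  | zero =>
    intro ds hds c s pos arr
    have : ds = [] := List.eq_nil_of_length_eq_zero (by omega)
    subst this
    simp [PySem.List.enumerate_nil, aFinish, altRun_nil, if_neg (by omega : ¬ (0:Int) ≥ m)]
  | succ n ih =>
    intro ds hds c s pos arr
    cases ds with
    | nil =>
      simp [PySem.List.enumerate_nil, aFinish, altRun_nil, if_neg (by omega : ¬ (0:Int) ≥ m)]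
    | cons b t =>
      cases b with
      | false =>
        rw [PySem.List.enumerate_cons, List.foldl_cons]
        rw [aStep_false, if_neg (by omega : ¬ (0:Int) ≥ m)]
        rw [ih t (by simp at hds; omega) c s (pos + 1) arr, altRun_false_cons]
      | true =>
        have hsplit : t.takeWhile (· == true) ++ t.dropWhile (· == true) = t :=
          List.takeWhile_append_dropWhile
        set k := t.takeWhile (· == true) with hk
        set r := t.dropWhile (· == true) with hr
        have hkt : ∀ b ∈ k, b = true := by
          intro b hb
          have := List.mem_takeWhile_imp hb
          simpa using this
        have hlen : k.length + r.length = t.length := by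
          rw [← hsplit]; simp
        have hfold : (PySem.List.enumerate (true :: t) pos).foldl (aStep m) (c, 0, s, arr) =
            (PySem.List.enumerate r (pos + (1 + (k.length : Int)))).foldl (aStep m)
              (c, 1 + (k.length : Int), pos, arr) := by
          rw [show (true :: t) = (true :: k) ++ r by simp [hsplit],
            PySem.List.enumerate_append, List.foldl_append,
            fold_true_run_start m k hkt c s arr pos]
          congr 2
          simp
          ring
        rw [hfold, altRun_true_cons]
        simp only [← hk, ← hr]
        cases hrc : r with
        | nil =>
          simp only [PySem.List.enumerate_nil, List.foldl_nil, aFinish]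
          by_cases hge : (1 : Int) + k.length ≥ m
          · rw [if_pos hge, if_pos hge, altRun_nil]
            simp
          · rw [if_neg hge, if_neg hge, altRun_nil]
            simp
        | cons b' r' =>
          have hb' : b' = false := by
            have := List.head?_dropWhile_not (· == true) t
            rw [← hr, hrc] at this
            simpa using this
          subst hb'
          rw [PySem.List.enumerate_cons, List.foldl_cons]
          have hlen' : r'.length ≤ n := by
            simp only [List.length_cons] at hds
            have : r.length = r'.length + 1 := by rw [hrc]; simp
            omega
          by_cases hge : (1 : Int) + k.length ≥ m
          · rw [aStep_false, if_pos hge, if_pos hge]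
            rw [ih r' hlen' (c + 1) pos (pos + (1 + (k.length : Int)) + 1)
              (arr ++ [[pos, 1 + (k.length : Int)]])]
            rw [altRun_false_cons]
            simp
          · rw [aStep_false, if_neg hge, if_neg hge]
            rw [ih r' hlen' c pos (pos + (1 + (k.length : Int)) + 1) arr]
            rw [altRun_false_cons]
            simp

-- A = altRun, regime min_segment ≤ 0: every False is isolated and the list ends in True
theorem main_nonpos (m : Int) (hm : m ≤ 0) :
    ∀ (fuel : Nat) (ds : List Bool), ds.length ≤ fuel →
      ds.head? = some true → badFF ds = false → ds.getLast? = some true →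
      ∀ (c s pos : Int) (arr : List (List Int)),
        aFinish m ((PySem.List.enumerate ds pos).foldl (aStep m) (c, 0, s, arr)) =
          arr ++ altRun ds m pos := by
  intro fuel
  induction fuel with
  | zero =>
    intro ds hds hhead _ _
    have : ds = [] := List.eq_nil_of_length_eq_zero (by omega)
    subst this; simp at hhead
  | succ n ih =>
    intro ds hds hhead hff hlast c s pos arr
    cases ds with
    | nil => simp at hhead
    | cons b t =>
      have hb : b = true := by simpa using hhead
      subst hb
      have hsplit : t.takeWhile (· == true) ++ t.dropWhile (· == true) = t :=
        List.takeWhile_append_dropWhile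
      set k := t.takeWhile (· == true) with hk
      set r := t.dropWhile (· == true) with hr
      have hkt : ∀ b ∈ k, b = true := by
        intro b hb
        have := List.mem_takeWhile_imp hb
        simpa using this
      have hlen : k.length + r.length = t.length := by
        rw [← hsplit]; simp
      have hge : (1 : Int) + k.length ≥ m := by
        have : (0 : Int) ≤ k.length := Int.natCast_nonneg _
        omega
      have hfold : (PySem.List.enumerate (true :: t) pos).foldl (aStep m) (c, 0, s, arr) =
          (PySem.List.enumerate r (pos + (1 + (k.length : Int)))).foldl (aStep m)
            (c, 1 + (k.length : Int), pos, arr) := by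
        rw [show (true :: t) = (true :: k) ++ r by simp [hsplit],
          PySem.List.enumerate_append, List.foldl_append,
          fold_true_run_start m k hkt c s arr pos]
        congr 2
        simp
        ring
      have hffr : badFF r = false := by
        have h1 : badFF ((true :: k) ++ r) = false := by
          rw [show ((true : Bool) :: k) ++ r = true :: t by simp [hsplit]]
          exact hff
        exact badFF_append _ _ h1
      have hlastr : r ≠ [] → r.getLast? = some true := by
        intro hne
        have h2 : ((true :: k) ++ r).getLast? = r.getLast?.or (true :: k).getLast? :=
          List.getLast?_append
        rw [show ((true : Bool) :: k) ++ r = true :: t by simp [hsplit], hlast] at h2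
        cases hro : r.getLast? with
        | none => exact absurd (List.getLast?_eq_none_iff.mp hro) hne
        | some v => rw [hro] at h2; simp at h2; simp [h2]
      rw [hfold, altRun_true_cons]
      simp only [← hk, ← hr]
      cases hrc : r with
      | nil =>
        simp only [PySem.List.enumerate_nil, List.foldl_nil, aFinish]
        rw [if_pos hge, if_pos hge, altRun_nil]
        simp
      | cons b' r' =>
        have hb' : b' = false := by
          have := List.head?_dropWhile_not (· == true) t
          rw [← hr, hrc] at this
          simpa using this
        subst hb'
        cases hr'c : r' with
        | nil =>
          exfalso
          have := hlastr (by rw [hrc]; simp)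
          rw [hrc, hr'c] at this
          simp at this
        | cons b'' r'' =>
          have hb'' : b'' = true := by
            have h3 : badFF (false :: r') = false := by rw [← hrc]; exact hffr
            rw [hr'c, badFF] at h3
            rcases Bool.or_eq_false_iff.mp h3 with ⟨h1, _⟩
            simpa using h1
          subst hb''
          rw [PySem.List.enumerate_cons, List.foldl_cons]
          rw [aStep_false, if_pos hge]
          have hlen' : r'.length ≤ n := by
            simp only [List.length_cons] at hds
            have : r.length = r'.length + 1 := by rw [hrc]; simp
            omega
          have hffr' : badFF r' = false := badFF_cons false r' (by rw [← hrc]; exact hffr)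
          have hlastr' : r'.getLast? = some true := by
            have h1 := hlastr (by rw [hrc]; simp)
            rw [hrc] at h1
            rwa [show (false :: r').getLast? = r'.getLast? by
              rw [hr'c]; simp [List.getLast?_cons_cons]] at h1
          rw [hr'c] at hlen' hffr' hlastr'
          rw [ih (true :: r'') hlen' (by simp) hffr' hlastr'
            (c + 1) pos (pos + (1 + (k.length : Int)) + 1)
            (arr ++ [[pos, 1 + (k.length : Int)]])]
          rw [if_pos hge, altRun_false_cons]
          simp

-- ---- B-side machinery: the starts/ends/zip computation characterised through altRun ----

-- the starts list of B, exactly the port's expression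
def Sfil (l : List Bool) : List Nat :=
  (List.range l.length).filter
    (fun i => l.getD i false && (i == 0 || !(l.getD (i - 1) false)))

-- the ends filter of B (before the +1 map), exactly the port's expression
def Efil (l : List Bool) : List Nat :=
  (List.range l.length).filter
    (fun i => l.getD i false && (i == l.length - 1 || !(l.getD (i + 1) false)))

-- recursive models of the two filters
def sRec (prev : Bool) : List Bool → List Nat
  | [] => []
  | b :: t => (if b && !prev then [0] else []) ++ (sRec b t).map (· + 1)

def eRec : List Bool → List Nat
  | [] => []
  | b :: t => (if b && !(t.getD 0 false) then [0] else []) ++ (eRec t).map (· + 1)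

theorem filter_range_succ (p : Nat → Bool) (n : Nat) :
    (List.range (n + 1)).filter p =
      (if p 0 then [0] else []) ++ ((List.range n).filter (fun i => p (i + 1))).map (· + 1) := by
  rw [List.range_succ_eq_map, List.filter_cons, List.filter_map]
  by_cases h : p 0 = true
  · rw [if_pos h, if_pos h]
    rfl
  · rw [if_neg h, if_neg (by simpa using h)]
    rfl

theorem sFil_eq_sRec : ∀ (l : List Bool) (prev : Bool),
    (List.range l.length).filter (fun i => l.getD i false && !((prev :: l).getD i false)) =
      sRec prev l := by
  intro l
  induction l with
  | nil => intro prev; rfl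
  | cons b t ih =>
    intro prev
    rw [List.length_cons, filter_range_succ, sRec]
    have h2 : ((List.range t.length).filter
        (fun i => (b :: t).getD (i + 1) false && !((prev :: b :: t).getD (i + 1) false))) =
        (List.range t.length).filter
          (fun i => t.getD i false && !((b :: t).getD i false)) := by
      apply List.filter_congr
      intro i _
      simp
    rw [h2, ih b]
    simp

theorem Sfil_cons (b : Bool) (t : List Bool) :
    Sfil (b :: t) = (if b then [0] else []) ++ (sRec b t).map (· + 1) := by
  rw [Sfil, List.length_cons, filter_range_succ]
  have h2 : ((List.range t.length).filter
      (fun i => (b :: t).getD (i + 1) false &&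
        ((i + 1 : Nat) == 0 || !((b :: t).getD (i + 1 - 1) false)))) =
      (List.range t.length).filter
        (fun i => t.getD i false && !((b :: t).getD i false)) := by
    apply List.filter_congr
    intro i _
    simp
  rw [h2, sFil_eq_sRec t b]
  congr 1
  cases b <;> simp

theorem Efil_eq_eRec : ∀ (l : List Bool), Efil l = eRec l := by
  have key : ∀ (l : List Bool),
      (List.range l.length).filter (fun i => l.getD i false && !(l.getD (i + 1) false)) =
        eRec l := by
    intro l
    induction l with
    | nil => rfl
    | cons b t ih =>
      rw [List.length_cons, filter_range_succ, eRec]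
      have h2 : ((List.range t.length).filter
          (fun i => (b :: t).getD (i + 1) false && !((b :: t).getD (i + 1 + 1) false))) =
          (List.range t.length).filter
            (fun i => t.getD i false && !(t.getD (i + 1) false)) := by
        apply List.filter_congr
        intro i _
        simp
      rw [h2, ih]
      simp
  intro l
  rw [← key l, Efil]
  apply List.filter_congr
  intro i hi
  have hilt : i < l.length := List.mem_range.mp hi
  by_cases h : i = l.length - 1
  · have hout : l.length ≤ i + 1 := by omega
    rw [List.getD_eq_default _ _ hout]
    simp [h]
  · have hb : (i == l.length - 1) = false := beq_eq_false_iff_ne.mpr h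
    rw [hb]
    simp

theorem map_shift (l : List Nat) (a b : Nat) :
    (l.map (· + a)).map (· + b) = l.map (· + (a + b)) := by
  rw [List.map_map]
  apply List.map_congr_left
  intro x _
  simp
  omega

theorem sRec_false_eq_Sfil : ∀ (t : List Bool), sRec false t = Sfil t := by
  intro t
  cases t with
  | nil => rfl
  | cons b t' =>
    rw [sRec, Sfil_cons]
    congr 1
    cases b <;> simp

theorem Sfil_false_cons (t : List Bool) : Sfil (false :: t) = (Sfil t).map (· + 1) := by
  rw [Sfil_cons, sRec_false_eq_Sfil]
  simp

theorem eRec_false_cons (t : List Bool) : eRec (false :: t) = (eRec t).map (· + 1) := by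
  rw [eRec]
  simp

theorem sRec_true : ∀ (t : List Bool),
    sRec true t = (Sfil (t.dropWhile (· == true))).map (· + (t.takeWhile (· == true)).length) := by
  intro t
  induction t with
  | nil => simp [sRec, Sfil]
  | cons b t' ih =>
    cases b with
    | true =>
      show ([] : List Nat) ++ (sRec true t').map (· + 1) =
        (Sfil (t'.dropWhile (· == true))).map
          (· + (true :: t'.takeWhile (· == true)).length)
      rw [List.nil_append, ih, map_shift, List.length_cons]
    | false =>
      show ([] : List Nat) ++ (sRec false t').map (· + 1) =
        (Sfil (false :: t')).map (· + ([] : List Bool).length)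
      rw [List.nil_append, sRec_false_eq_Sfil, Sfil_false_cons, List.length_nil, map_shift]

theorem Sfil_true_cons (t : List Bool) :
    Sfil (true :: t) =
      0 :: (Sfil (t.dropWhile (· == true))).map (· + ((t.takeWhile (· == true)).length + 1)) := by
  rw [Sfil_cons, sRec_true, map_shift]
  simp

theorem eRec_true_cons : ∀ (t : List Bool),
    eRec (true :: t) =
      (t.takeWhile (· == true)).length ::
        (eRec (t.dropWhile (· == true))).map (· + ((t.takeWhile (· == true)).length + 1)) := by
  intro t
  induction t with
  | nil => simp [eRec]
  | cons b t' ih =>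
    cases b with
    | true =>
      show ([] : List Nat) ++ (eRec (true :: t')).map (· + 1) =
        (true :: t'.takeWhile (· == true)).length ::
          (eRec (t'.dropWhile (· == true))).map
            (· + ((true :: t'.takeWhile (· == true)).length + 1))
      rw [List.nil_append, ih, List.map_cons, map_shift, List.length_cons]
    | false =>
      show ([0] : List Nat) ++ (eRec (false :: t')).map (· + 1) =
        ([] : List Bool).length ::
          (eRec (false :: t')).map (· + (([] : List Bool).length + 1))
      rw [List.length_nil, List.singleton_append]

theorem zipf_eq_altRun (m : Int) :
    ∀ (fuel : Nat) (ds : List Bool), ds.length ≤ fuel → ∀ (pos : Int),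
      ((Sfil ds).zip ((eRec ds).map (· + 1))).filterMap (fun p : Nat × Nat =>
          if (p.2 : Int) - (p.1 : Int) ≥ m then
            some [pos + (p.1 : Int), (p.2 : Int) - (p.1 : Int)]
          else none) =
        altRun ds m pos := by
  intro fuel
  induction fuel with
  | zero =>
    intro ds hds pos
    have : ds = [] := List.eq_nil_of_length_eq_zero (by omega)
    subst this
    rw [altRun_nil]
    rfl
  | succ n ih =>
    intro ds hds pos
    cases ds with
    | nil => rw [altRun_nil]; rfl
    | cons b t =>
      cases b with
      | false =>
        rw [altRun_false_cons, Sfil_false_cons, eRec_false_cons]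
        rw [List.zip_map, List.filterMap_map]
        rw [← ih t (by simp at hds; omega) (pos + 1)]
        apply List.filterMap_congr
        intro p _
        rcases p with ⟨a, c⟩
        simp only [Function.comp_apply, Prod.map_apply]
        by_cases h : ((c + 1 : Nat) : Int) - ((a + 1 : Nat) : Int) ≥ m
        · rw [if_pos h, if_pos (by push_cast at h ⊢; omega)]
          congr 2
          · push_cast; ring
          · push_cast; ring
        · rw [if_neg h, if_neg (by push_cast at h ⊢; omega)]
      | true =>
        rw [altRun_true_cons, Sfil_true_cons, eRec_true_cons]
        set k := (t.takeWhile (· == true)).length with hk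
        set r := t.dropWhile (· == true) with hr
        simp only [List.map_cons]
        have hends : ((eRec r).map (· + (k + 1))).map (· + 1) =
            ((eRec r).map (· + 1)).map (· + (k + 1)) := by
          rw [map_shift, map_shift]
          apply List.map_congr_left
          intro x _
          omega
        rw [hends, List.zip_cons_cons, List.filterMap_cons, List.zip_map,
          List.filterMap_map]
        have hlenr : r.length ≤ n := by
          have := List.length_dropWhile_le (· == true) t
          simp only [List.length_cons] at hds
          rw [hr]
          omega
        have htail :
            ((Sfil r).zip ((eRec r).map (· + 1))).filterMap
              ((fun p : Nat × Nat => if (p.2 : Int) - (p.1 : Int) ≥ m then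
                  some [pos + (p.1 : Int), (p.2 : Int) - (p.1 : Int)] else none) ∘
                Prod.map (· + (k + 1)) (· + (k + 1))) =
            altRun r m (pos + (1 + (k : Int))) := by
          rw [← ih r hlenr (pos + (1 + (k : Int)))]
          apply List.filterMap_congr
          intro p _
          rcases p with ⟨a, c⟩
          simp only [Function.comp_apply, Prod.map_apply]
          by_cases h : ((c + (k + 1) : Nat) : Int) - ((a + (k + 1) : Nat) : Int) ≥ m
          · rw [if_pos h, if_pos (by push_cast at h ⊢; omega)]
            congr 2
            · push_cast; ring
            · push_cast; ring
          · rw [if_neg h, if_neg (by push_cast at h ⊢; omega)]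
        rw [htail]
        by_cases hge : (1 : Int) + (k : Int) ≥ m
        · rw [if_pos (by push_cast; omega : ((k + 1 : Nat) : Int) - ((0 : Nat) : Int) ≥ m),
            if_pos hge]
          simp only [List.singleton_append]
          congr 2
          · push_cast; ring
          · push_cast; ring
        · rw [if_neg (by push_cast; omega : ¬ ((k + 1 : Nat) : Int) - ((0 : Nat) : Int) ≥ m),
            if_neg hge]
          simp


-- port B unfolded to Sfil / eRec
theorem find_episodes_alt_eq (ds : List Bool) (m : Int) :
    find_episodes_alt ds m = altRun ds m 0 := by
  have hport : find_episodes_alt ds m =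
      ((Sfil ds).zip ((Efil ds).map (· + 1))).filterMap (fun p : Nat × Nat =>
        if (p.2 : Int) - (p.1 : Int) ≥ m then
          some [(p.1 : Int), (p.2 : Int) - (p.1 : Int)]
        else none) := rfl
  rw [hport, Efil_eq_eRec, ← zipf_eq_altRun m ds.length ds le_rfl 0]
  apply List.filterMap_congr
  intro p _
  by_cases h : (p.2 : Int) - (p.1 : Int) ≥ m
  · rw [if_pos h, if_pos h]
    simp
  · rw [if_neg h, if_neg h]

-- ===== VERDICT (by name: the statement is the Claim_ definition above) =====
theorem find_episodes_spec : Claim_unchanged_find_episodes := by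
  intro ds m _ hpre
  unfold Spec_find_episodes
  intro hnD
  rw [find_episodes_eq, find_episodes_alt_eq]
  by_cases hm : 1 ≤ m
  · have := main_pos m hm ds.length ds (le_refl _) 0 0 0 []
    simpa using this
  · have hm' : m ≤ 0 := by omega
    have hhead : ds.head? = some true := by
      rcases hpre with h | h
      · exact absurd h hm
      · exact h
    have hne : ds ≠ [] := by intro h; rw [h] at hhead; simp at hhead
    unfold D_find_episodes at hnD
    push_neg at hnD
    have hD := hnD hm' hhead
    have hff : badFF ds = false := by
      cases h : badFF ds
      · rfl
      · exact absurd h hD.1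
    have hlast : ds.getLast? = some true := by
      cases hlo : ds.getLast? with
      | none => exact absurd (List.getLast?_eq_none_iff.mp hlo) hne
      | some v =>
        cases v
        · exact absurd hlo hD.2
        · rfl
    have := main_nonpos m hm' ds.length ds (le_refl _) hhead hff hlast 0 0 0 []
    simpa using this

theorem find_episodes_changed : Claim_changed_find_episodes := by
  unfold Claim_changed_find_episodes
  refine ⟨by decide, by decide, by decide, by decide, ?_, by decide⟩
  show find_episodes_alt [true, false, false] 0 = [[0, 1]]
  decide
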